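-- pv_equiv track=rewrite | github.com/OTOYO1020/ChatDev_Intermediate | WareHouse/D_227__20250506045616/utils.py | calculate_max_projects
-- ===== SOURCE A (Python) =====
-- def calculate_max_projects(N, K, employees):
--     '''
--     Calculates the maximum number of projects that can be formed.
--     '''
--     if K > N:
--         return 0
--     # Sort employees in descending order
--     employees.sort(reverse=True)
--     max_projects = 0
--     # Continue forming projects while all K departments have at least one employee
--     while True:
--         # Check if we can form a project with the first K departments
--         if all(emp > 0 for emp in employees[:K]):
--             for i in range(K):
--                 employees[i] -= 1  # Decrement the employee count for the first K departments
--             max_projects += 1  # Increment the project count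
--         else:
--             break  # Exit the loop if any of the first K departments has no employees left
--         # Re-sort the employees after decrementing to maintain the order
--         employees.sort(reverse=True)
--     return max_projects
-- ===== SOURCE B (Python) =====
-- def calculate_max_projects(N, K, employees):
--     '''
--     Calculates the maximum number of projects that can be formed.
--     Binary search on the number of rounds m: m rounds are possible
--     iff sum(min(c, m) for positive c) >= K*m.  Does not mutate employees.
--     '''
--     if K > N:
--         return 0
--     total = sum(c for c in employees if c > 0)
--
--     def feasible(m):
--         return K * m <= sum(min(c, m) for c in employees if c > 0)
--
--     lo, hi = 0, total // K
--     while lo < hi: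
--         mid = (lo + hi + 1) // 2
--         if feasible(mid):
--             lo = mid
--         else:
--             hi = mid - 1
--     return lo
-- ===== Notes on version B (the rewrite author's own statement) =====
-- stated objective: alternative
-- what changed: A simulates the process round by round, re-sorting the list and decrementing the K largest counts each round; B instead binary-searches the number of rounds m using the feasibility criterion K*m <= sum(min(c, m)) over positive counts, never sorting or mutating the list.
-- outside the precondition, e.g. on calculate_max_projects(0, -1, [0, 0]): A returns 0, B returns 0
-- crash fix: When 1 <= K <= N but the all-positive employee list has fewer than K entries, A raises IndexError while decrementing the first K entries; B returns 0. — e.g. on calculate_max_projects(1, 1, []): A raises IndexError, B returns 0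
import Mathlib
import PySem

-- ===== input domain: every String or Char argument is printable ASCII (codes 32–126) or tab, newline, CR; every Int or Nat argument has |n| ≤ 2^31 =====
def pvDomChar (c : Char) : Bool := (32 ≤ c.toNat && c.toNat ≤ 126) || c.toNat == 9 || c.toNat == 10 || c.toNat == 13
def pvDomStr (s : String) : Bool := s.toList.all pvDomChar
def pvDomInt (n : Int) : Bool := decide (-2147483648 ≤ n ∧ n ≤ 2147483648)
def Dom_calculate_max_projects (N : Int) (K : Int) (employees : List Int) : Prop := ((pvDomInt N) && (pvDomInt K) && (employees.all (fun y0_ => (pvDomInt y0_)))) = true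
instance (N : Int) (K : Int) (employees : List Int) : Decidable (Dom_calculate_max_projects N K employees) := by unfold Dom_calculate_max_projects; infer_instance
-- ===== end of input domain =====

-- B replaces A's repeated sort-decrement simulation by a different algorithm: a binary
-- search on the number of rounds m with the feasibility test K*m ≤ Σ min(c,m) over positive c.
-- NOTE: Python A mutates `employees` in place (sorts and decrements it); the equivalence
-- proved here is about the RETURN value only (B does not mutate).

-- ===== PORT A =====
-- A's `while True` loop; fuel is a termination device only: under Pre_ the loop runs at
-- most (sum of positive counts) times, and the caller passes fuel = that sum + 1.
def pvLoopA (K : Int) : Nat → List Int → Int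
  | 0, _ => 0
  | fuel + 1, L =>
    -- if all(emp > 0 for emp in employees[:K])
    if (PySem.List.slice L none (some K)).all (fun c => decide (0 < c)) then
      -- for i in range(K): employees[i] -= 1   (exact for 0 ≤ K ≤ len(employees);
      -- Python raises IndexError when len < K here, excluded by Pre_)
      -- then max_projects += 1 and employees.sort(reverse=True)
      pvLoopA K fuel
        (PySem.List.sorted ((L.take K.toNat).map (fun c => c - 1) ++ L.drop K.toNat)
          (fun c => c) true) + 1
    else 0

def calculate_max_projects (N : Int) (K : Int) (employees : List Int) : Int :=
  if K > N then 0
  else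
    let L := PySem.List.sorted employees (fun c => c) true
    pvLoopA K ((L.map (fun c => max c 0)).sum.toNat + 1) L

-- ===== PORT B =====
def pvBTotal (employees : List Int) : Int :=
  (employees.filter (fun c => decide (0 < c))).sum

def pvFeasible (K : Int) (employees : List Int) (m : Int) : Bool :=
  decide (K * m ≤ ((employees.filter (fun c => decide (0 < c))).map (fun c => min c m)).sum)

def pvBSearch (K : Int) (employees : List Int) (lo hi : Int) : Int :=
  if h : lo < hi then
    let mid := PySem.Int.floordiv (lo + hi + 1) 2
    if pvFeasible K employees mid then pvBSearch K employees mid hi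
    else pvBSearch K employees lo (mid - 1)
  else lo
termination_by (hi - lo).toNat
decreasing_by
  · have hm : mid = (lo + hi + 1) / 2 := PySem.Int.floordiv_eq_ediv_of_pos (by omega)
    omega
  · have hm : mid = (lo + hi + 1) / 2 := PySem.Int.floordiv_eq_ediv_of_pos (by omega)
    omega

def calculate_max_projects_alt (N : Int) (K : Int) (employees : List Int) : Int :=
  if K > N then 0
  else pvBSearch K employees 0 (PySem.Int.floordiv (pvBTotal employees) K)

-- ===== PRECONDITION & SPEC =====
-- Pre_ excludes K ≤ 0 (A loops forever there, or — for negative K with a non-positive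
-- entry among employees[:K] — returns 0 only through Python's negative-slice accident)
-- and the inputs where A raises IndexError (K ≤ N yet fewer than K all-positive employees).
def Pre_calculate_max_projects (N : Int) (K : Int) (employees : List Int) : Prop :=
  1 ≤ K ∧ (N < K ∨ K ≤ (employees.length : Int) ∨ ¬ (employees.all (fun c => decide (0 < c)) = true))
instance (N : Int) (K : Int) (employees : List Int) : Decidable (Pre_calculate_max_projects N K employees) := by
  unfold Pre_calculate_max_projects; infer_instance

def pvWitness_calculate_max_projects : Int × Int × List Int := (3, 2, [5, 3, 0])

-- A raises IndexError when 1 ≤ K ≤ N but the (all-positive) employee list is shorter than K; B returns 0 there.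
def Raises_calculate_max_projects (N : Int) (K : Int) (employees : List Int) : Prop :=
  1 ≤ K ∧ K ≤ N ∧ (employees.length : Int) < K ∧ employees.all (fun c => decide (0 < c)) = true
instance (N : Int) (K : Int) (employees : List Int) : Decidable (Raises_calculate_max_projects N K employees) := by
  unfold Raises_calculate_max_projects; infer_instance
def pvRaiseWitness_calculate_max_projects : Int × Int × List Int := (1, 1, [])
def pvRaiseWitnessOut_calculate_max_projects : Int := 0

def Spec_calculate_max_projects (N : Int) (K : Int) (employees : List Int) (out : Int) : Prop := out = calculate_max_projects_alt N K employees
instance (N : Int) (K : Int) (employees : List Int) (out : Int) : Decidable (Spec_calculate_max_projects N K employees out) := by unfold Spec_calculate_max_projects; infer_instance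

-- ===== CLAIM (what is proved, stated in full; the proofs are below) =====
def Claim_equal_calculate_max_projects : Prop := ∀ (N : Int) (K : Int) (employees : List Int), Dom_calculate_max_projects N K employees → Pre_calculate_max_projects N K employees → Spec_calculate_max_projects N K employees (calculate_max_projects N K employees)

def Claim_raises_calculate_max_projects : Prop := (∀ (N : Int) (K : Int) (employees : List Int), Dom_calculate_max_projects N K employees → Raises_calculate_max_projects N K employees → ¬ Pre_calculate_max_projects N K employees) ∧ (Dom_calculate_max_projects (pvRaiseWitness_calculate_max_projects.1) (pvRaiseWitness_calculate_max_projects.2.1) (pvRaiseWitness_calculate_max_projects.2.2) ∧ Raises_calculate_max_projects (pvRaiseWitness_calculate_max_projects.1) (pvRaiseWitness_calculate_max_projects.2.1) (pvRaiseWitness_calculate_max_projects.2.2) ∧ calculate_max_projects_alt (pvRaiseWitness_calculate_max_projects.1) (pvRaiseWitness_calculate_max_projects.2.1) (pvRaiseWitness_calculate_max_projects.2.2) = pvRaiseWitnessOut_calculate_max_projects)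

-- ===== LEMMAS AND PROOFS =====

-- `gsum L m` = Σ_{c ∈ L} min(max(c,0), m): the number of employee-slots usable in m rounds.
def gsum (L : List Int) (m : Int) : Int := (L.map (fun c => min (max c 0) m)).sum

-- `feas K L m`: m rounds are feasible on the multiset L.
def feas (K : Int) (L : List Int) (m : Int) : Prop := K * m ≤ gsum L m

-- `sumpos L` = Σ max(c,0).
def sumpos (L : List Int) : Int := (L.map (fun c => max c 0)).sum

theorem gsum_nil (m : Int) : gsum [] m = 0 := rfl
theorem gsum_cons (c : Int) (L : List Int) (m : Int) :
    gsum (c :: L) m = min (max c 0) m + gsum L m := rfl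
theorem gsum_append (xs ys : List Int) (m : Int) :
    gsum (xs ++ ys) m = gsum xs m + gsum ys m := by
  simp [gsum]

theorem gsum_zero (L : List Int) : gsum L 0 = 0 := by
  induction L with
  | nil => rfl
  | cons c L ih => rw [gsum_cons, ih]; omega

theorem gsum_perm (xs ys : List Int) (h : xs.Perm ys) (m : Int) : gsum xs m = gsum ys m :=
  List.Perm.sum_eq (List.Perm.map _ h)

theorem sumpos_perm (xs ys : List Int) (h : xs.Perm ys) : sumpos xs = sumpos ys :=
  List.Perm.sum_eq (List.Perm.map _ h)

theorem sumpos_nonneg (L : List Int) : 0 ≤ sumpos L := by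
  induction L with
  | nil => simp [sumpos]
  | cons c L ih => simp only [sumpos, List.map_cons, List.sum_cons] at *; omega

theorem sumpos_append (xs ys : List Int) : sumpos (xs ++ ys) = sumpos xs + sumpos ys := by
  simp [sumpos]

theorem gsum_le_sumpos (L : List Int) (m : Int) (hm : 0 ≤ m) : gsum L m ≤ sumpos L := by
  induction L with
  | nil => simp [gsum_nil, sumpos]
  | cons c L ih =>
    rw [gsum_cons]
    simp only [sumpos, List.map_cons, List.sum_cons] at *
    omega

-- B's generator sum equals gsum (for 0 ≤ m).
theorem filter_min_sum_eq (L : List Int) (m : Int) (hm : 0 ≤ m) :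
    ((L.filter (fun c => decide (0 < c))).map (fun c => min c m)).sum = gsum L m := by
  induction L with
  | nil => rfl
  | cons c L ih =>
    rw [gsum_cons, ← ih]
    by_cases hc : 0 < c
    · simp only [List.filter_cons, hc, decide_true, if_true, List.map_cons, List.sum_cons]
      omega
    · simp [List.filter_cons, hc]
      omega

theorem filter_sum_eq_sumpos (L : List Int) :
    (L.filter (fun c => decide (0 < c))).sum = sumpos L := by
  induction L with
  | nil => rfl
  | cons c L ih =>
    simp only [sumpos, List.map_cons, List.sum_cons] at *
    rw [← ih]
    by_cases hc : 0 < c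
    · simp only [List.filter_cons, hc, decide_true, if_true, List.sum_cons]
      omega
    · simp [List.filter_cons, hc]
      omega

-- monotonicity in m
theorem gsum_mono (L : List Int) (m m' : Int) (h : m ≤ m') : gsum L m ≤ gsum L m' := by
  induction L with
  | nil => simp [gsum_nil]
  | cons c L ih => rw [gsum_cons, gsum_cons]; omega

-- concavity-style inequality: m' * gsum L m ≤ m * gsum L m' for 0 ≤ m' ≤ m
theorem gsum_mul_mono (L : List Int) (m m' : Int) (h0 : 0 ≤ m') (h1 : m' ≤ m) :
    m' * gsum L m ≤ m * gsum L m' := by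
  induction L with
  | nil => simp [gsum_nil]
  | cons c L ih =>
    rw [gsum_cons, gsum_cons, mul_add, mul_add]
    have key : m' * min (max c 0) m ≤ m * min (max c 0) m' := by
      rcases le_or_gt (max c 0) m' with hc | hc
      · have e1 : min (max c 0) m' = max c 0 := min_eq_left hc
        have e2 : min (max c 0) m = max c 0 := min_eq_left (le_trans hc h1)
        rw [e1, e2]
        exact mul_le_mul_of_nonneg_right h1 (le_max_right c 0)
      · have e1 : min (max c 0) m' = m' := min_eq_right (le_of_lt hc)
        rw [e1]
        rcases le_or_gt (max c 0) m with hd | hd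
        · have e2 : min (max c 0) m = max c 0 := min_eq_left hd
          rw [e2, mul_comm m m']
          exact mul_le_mul_of_nonneg_left hd h0
        · have e2 : min (max c 0) m = m := min_eq_right (le_of_lt hd)
          rw [e2, mul_comm m m']
      ;
    omega
  ;

-- downward monotone feasibility (prefix property)
theorem feas_mono (K : Int) (L : List Int) (m m' : Int) (h0 : 0 ≤ m') (h1 : m' ≤ m)
    (hf : feas K L m) : feas K L m' := by
  unfold feas at *
  rcases eq_or_lt_of_le h0 with hm | hm
  · rw [← hm, gsum_zero]; omega
  · have hmpos : 0 < m := lt_of_lt_of_le hm h1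
    have h2 := gsum_mul_mono L m m' h0 h1
    have h3 : K * m * m' ≤ gsum L m * m' :=
      mul_le_mul_of_nonneg_right hf h0
    have h4 : K * m' * m ≤ gsum L m' * m := by nlinarith
    exact le_of_mul_le_mul_right h4 hmpos

theorem gsum_map_sub_one (xs : List Int) (m : Int) (hm : 1 ≤ m) (hpos : ∀ c ∈ xs, 0 < c) :
    gsum (xs.map (fun c => c - 1)) (m - 1) = gsum xs m - xs.length := by
  induction xs with
  | nil => simp [gsum_nil]
  | cons c L ih =>
    have hc := hpos c (List.mem_cons_self ..)
    have ihh := ih (fun d hd => hpos d (List.mem_cons_of_mem _ hd))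
    simp only [List.map_cons, gsum_cons, List.length_cons] at *
    push_cast
    omega

theorem sumpos_map_sub_one (xs : List Int) (hpos : ∀ c ∈ xs, 0 < c) :
    sumpos (xs.map (fun c => c - 1)) = sumpos xs - xs.length := by
  induction xs with
  | nil => simp [sumpos]
  | cons c L ih =>
    have hc := hpos c (List.mem_cons_self ..)
    have ihh := ih (fun d hd => hpos d (List.mem_cons_of_mem _ hd))
    simp only [List.map_cons, sumpos, List.sum_cons, List.length_cons] at *
    push_cast
    omega

theorem gsum_sub_one_count (xs : List Int) (m : Int) (hm : 1 ≤ m) :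
    gsum xs (m - 1) = gsum xs m - ((xs.filter (fun c => decide (m ≤ c))).length : Int) := by
  induction xs with
  | nil => simp [gsum_nil]
  | cons c L ih =>
    rw [gsum_cons, gsum_cons, List.filter_cons]
    by_cases hc : m ≤ c
    · rw [if_pos (by simpa using hc)]
      push_cast [List.length_cons]
      omega
    · rw [if_neg (by simpa using hc)]
      omega

theorem gsum_ge_count (xs : List Int) (m : Int) (hm : 1 ≤ m) :
    ((xs.filter (fun c => decide (m ≤ c))).length : Int) ≤ gsum xs m := by
  induction xs with
  | nil => simp [gsum_nil]
  | cons c L ih =>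
    rw [List.filter_cons, gsum_cons]
    by_cases hc : m ≤ c
    · rw [if_pos (by simpa using hc)]
      push_cast [List.length_cons]
      omega
    · rw [if_neg (by simpa using hc)]
      omega

theorem gsum_all_ge (xs : List Int) (m : Int) (hm : 1 ≤ m) (h : ∀ c ∈ xs, m ≤ c) :
    gsum xs m = (xs.length : Int) * m := by
  induction xs with
  | nil => simp [gsum_nil]
  | cons c L ih =>
    have hc := h c (List.mem_cons_self ..)
    have ihh := ih (fun d hd => h d (List.mem_cons_of_mem _ hd))
    simp only [gsum_cons, List.length_cons] at *
    push_cast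
    rw [ihh]
    have : min (max c 0) m = m := by omega
    rw [this]; ring

theorem gsum_le_length_one (xs : List Int) : gsum xs 1 ≤ (xs.length : Int) := by
  induction xs with
  | nil => simp [gsum_nil]
  | cons c L ih => simp only [gsum_cons, List.length_cons] at *; push_cast; omega

theorem gsum_nonpos_all (xs : List Int) (m : Int) (hm : 0 ≤ m) (h : ∀ c ∈ xs, c ≤ 0) :
    gsum xs m = 0 := by
  induction xs with
  | nil => rfl
  | cons c L ih =>
    have hc := h c (List.mem_cons_self ..)
    have ihh := ih (fun d hd => h d (List.mem_cons_of_mem _ hd))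
    rw [gsum_cons, ihh]
    omega

-- base case: if some entry of the top-K is ≤ 0 (list sorted descending), 1 round is infeasible
theorem base_not_feas (K : Int) (hK : 1 ≤ K) (L : List Int)
    (hs : L.Pairwise (fun a b => b ≤ a))
    (a : Int) (ha : a ∈ L.take K.toNat) (ha0 : a ≤ 0) : ¬ feas K L 1 := by
  obtain ⟨t1, t2, hT⟩ := List.append_of_mem ha
  have hL : L = t1 ++ (a :: (t2 ++ L.drop K.toNat)) := by
    have h := List.take_append_drop K.toNat L
    rw [hT] at h
    conv_lhs => rw [← h]
    simp
  have hlen1 : t1.length < K.toNat := by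
    have h1 : (L.take K.toNat).length ≤ K.toNat := by
      simp [List.length_take]
    rw [hT] at h1
    simp [List.length_append] at h1
    omega
  have hpw : ∀ x ∈ t2 ++ L.drop K.toNat, x ≤ a := by
    have := hs
    rw [hL] at this
    have h2 := (List.pairwise_append.1 this).2.1
    exact (List.pairwise_cons.1 h2).1
  intro hf
  unfold feas at hf
  rw [hL, gsum_append, gsum_cons] at hf
  have e0 : gsum (t2 ++ L.drop K.toNat) 1 = 0 :=
    gsum_nonpos_all _ 1 (by omega) (fun x hx => le_trans (hpw x hx) ha0)
  have e1 : gsum t1 1 ≤ (t1.length : Int) := gsum_le_length_one t1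
  have e2 : min (max a 0) 1 = 0 := by omega
  have e3 : (K.toNat : Int) = K := by omega
  omega

-- hard step: feasibility of m rounds implies feasibility of m-1 rounds after one greedy step
theorem step_feas_down (K : Int) (hK : 1 ≤ K) (L : List Int)
    (hs : L.Pairwise (fun a b => b ≤ a)) (hlen : K.toNat ≤ L.length)
    (hpos : ∀ c ∈ L.take K.toNat, 0 < c) (m : Int) (hm : 1 ≤ m) (h : feas K L m) :
    feas K ((L.take K.toNat).map (fun c => c - 1) ++ L.drop K.toNat) (m - 1) := by
  have hTlen : ((L.take K.toNat).length : Int) = K := by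
    simp [List.length_take]
    omega
  have hsplit : gsum (L.take K.toNat) m + gsum (L.drop K.toNat) m = gsum L m := by
    rw [← gsum_append, List.take_append_drop]
  have e1 := gsum_map_sub_one (L.take K.toNat) m hm hpos
  have e2 := gsum_sub_one_count (L.drop K.toNat) m hm
  set t : Int := (((L.drop K.toNat).filter (fun c => decide (m ≤ c))).length : Int) with ht
  have ht0 : 0 ≤ t := by positivity
  unfold feas at h ⊢
  rw [gsum_append, e1, e2, hTlen]
  have hK1 : K * (m - 1) = K * m - K := by ring
  rcases eq_or_lt_of_le ht0 with hcase | hcase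
  · -- t = 0: use feasibility of m rounds directly
    omega
  · -- t ≥ 1: some untouched employee has count ≥ m, so all top-K counts are ≥ m
    have hex : ∃ c0 ∈ (L.drop K.toNat).filter (fun c => decide (m ≤ c)), True := by
      rcases List.exists_mem_of_length_pos (l := (L.drop K.toNat).filter
        (fun c => decide (m ≤ c))) (by omega) with ⟨c0, hc0⟩
      exact ⟨c0, hc0, trivial⟩
    obtain ⟨c0, hc0, -⟩ := hex
    have hc0m : m ≤ c0 := by simpa using List.of_mem_filter hc0
    have hc0D : c0 ∈ L.drop K.toNat := List.mem_of_mem_filter hc0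
    have hTm : ∀ c ∈ L.take K.toNat, m ≤ c := by
      intro c hc
      have hpw : c0 ≤ c := by
        have h2 := hs
        rw [← List.take_append_drop K.toNat L] at h2
        exact (List.pairwise_append.1 h2).2.2 c hc c0 hc0D
      omega
    have eT : gsum (L.take K.toNat) m = ((L.take K.toNat).length : Int) * m :=
      gsum_all_ge _ m hm hTm
    have eD : t ≤ gsum (L.drop K.toNat) m := gsum_ge_count _ m hm
    rw [eT, hTlen]
    omega

theorem step_feas_up (K : Int) (hK : 1 ≤ K) (L : List Int) (hlen : K.toNat ≤ L.length)
    (hpos : ∀ c ∈ L.take K.toNat, 0 < c) (m : Int) (hm : 0 ≤ m)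
    (h : feas K ((L.take K.toNat).map (fun c => c - 1) ++ L.drop K.toNat) m) :
    feas K L (m + 1) := by
  have hTlen : ((L.take K.toNat).length : Int) = K := by
    simp [List.length_take]
    omega
  have e1 := gsum_map_sub_one (L.take K.toNat) (m + 1) (by omega) hpos
  rw [show m + 1 - 1 = m by ring] at e1
  have e2 : gsum (L.drop K.toNat) m ≤ gsum (L.drop K.toNat) (m + 1) :=
    gsum_mono _ m (m + 1) (by omega)
  unfold feas at h ⊢
  rw [gsum_append] at h
  rw [← List.take_append_drop K.toNat L, gsum_append]
  have hK1 : K * (m + 1) = K * m + K := by ring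
  omega

-- A's loop computes the (unique) r with feas r ∧ ¬ feas (r+1)
theorem loopA_spec (K : Int) (hK : 1 ≤ K) : ∀ (fuel : Nat) (L : List Int),
    L.Pairwise (fun a b => b ≤ a) →
    (K.toNat ≤ L.length ∨ ∃ c ∈ L, c ≤ 0) →
    sumpos L < (fuel : Int) →
    0 ≤ pvLoopA K fuel L ∧ feas K L (pvLoopA K fuel L) ∧ ¬ feas K L (pvLoopA K fuel L + 1) := by
  intro fuel
  induction fuel with
  | zero =>
    intro L _ _ hfuel
    have := sumpos_nonneg L
    norm_num at hfuel
    omega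
  | succ fuel ih =>
    intro L hs hOK hfuel
    rw [pvLoopA, PySem.List.slice_to L (by omega : (0:Int) ≤ K)]
    by_cases hC : (L.take K.toNat).all (fun c => decide (0 < c)) = true
    · -- a project is formed
      have hpos : ∀ c ∈ L.take K.toNat, 0 < c := by
        intro c hc
        simpa using List.all_eq_true.1 hC c hc
      have hklen : K.toNat ≤ L.length := by
        by_contra hlt
        rcases hOK with h | ⟨c, hc, hc0⟩
        · omega
        · have he : L.take K.toNat = L := List.take_of_length_le (by omega)
          have := hpos c (by rw [he]; exact hc)
          omega
      rw [if_pos hC]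
      set L1 : List Int := (L.take K.toNat).map (fun c => c - 1) ++ L.drop K.toNat with hL1
      set L2 : List Int := PySem.List.sorted L1 (fun c => c) true with hL2
      have hperm : L2.Perm L1 := PySem.List.sorted_perm L1 (fun c => c) true
      have hs2 : L2.Pairwise (fun a b => b ≤ a) := PySem.List.sorted_pairwise_rev L1 (fun c => c)
      have hTlen : ((L.take K.toNat).length : Int) = K := by
        simp [List.length_take]
        omega
      have hlen2 : L2.length = L.length := by
        rw [hperm.length_eq, hL1]
        simp [List.length_take, List.length_drop]
        omega
      have hsum2 : sumpos L2 = sumpos L - K := by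
        rw [sumpos_perm L2 L1 hperm, hL1, sumpos_append,
          sumpos_map_sub_one _ hpos, hTlen]
        have : sumpos (L.take K.toNat) + sumpos (L.drop K.toNat) = sumpos L := by
          rw [← sumpos_append, List.take_append_drop]
        omega
      have hfuel2 : sumpos L2 < (fuel : Int) := by
        push_cast at hfuel ⊢
        omega
      obtain ⟨h0, hf, hnf⟩ := ih L2 hs2 (Or.inl (by omega)) hfuel2
      have hfeq : ∀ x : Int, feas K L2 x ↔ feas K L1 x := by
        intro x
        unfold feas
        rw [gsum_perm L2 L1 hperm]
      refine ⟨by omega, ?_, ?_⟩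
      · exact step_feas_up K hK L hklen hpos _ h0 ((hfeq _).1 hf)
      · intro hcon
        have := step_feas_down K hK L hs hklen hpos _ (by omega) hcon
        rw [show pvLoopA K fuel L2 + 1 + 1 - 1 = pvLoopA K fuel L2 + 1 by ring] at this
        exact hnf ((hfeq _).2 this)
    · -- no project can be formed
      rw [if_neg hC]
      have hex : ∃ a ∈ L.take K.toNat, a ≤ 0 := by
        by_contra hno
        push_neg at hno
        exact hC (List.all_eq_true.2 (fun c hc => by simpa using hno c hc))
      obtain ⟨a, ha, ha0⟩ := hex
      refine ⟨le_refl 0, ?_, ?_⟩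
      · unfold feas
        rw [gsum_zero]
        simp
      · rw [zero_add]
        exact base_not_feas K hK L hs a ha ha0

-- B's binary search finds the unique r with feasible r ∧ ¬ feasible (r+1)
theorem bsearch_spec (K : Int) (emp : List Int) (hK : 1 ≤ K) : ∀ (n : Nat) (lo hi : Int),
    (hi - lo).toNat ≤ n → 0 ≤ lo → lo ≤ hi →
    pvFeasible K emp lo = true → pvFeasible K emp (hi + 1) = false →
    0 ≤ pvBSearch K emp lo hi ∧ pvFeasible K emp (pvBSearch K emp lo hi) = true ∧
      pvFeasible K emp (pvBSearch K emp lo hi + 1) = false := by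
  intro n
  induction n with
  | zero =>
    intro lo hi hn h0 hle hf hnf
    have heq : lo = hi := by omega
    rw [pvBSearch, dif_neg (by omega : ¬ lo < hi)]
    exact ⟨h0, hf, by rw [heq]; exact hnf⟩
  | succ n ih =>
    intro lo hi hn h0 hle hf hnf
    rw [pvBSearch]
    by_cases hlt : lo < hi
    · rw [dif_pos hlt]
      have hmid : PySem.Int.floordiv (lo + hi + 1) 2 = (lo + hi + 1) / 2 :=
        PySem.Int.floordiv_eq_ediv_of_pos (by omega)
      rw [hmid]
      by_cases hfm : pvFeasible K emp ((lo + hi + 1) / 2) = true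
      · rw [if_pos hfm]
        exact ih ((lo + hi + 1) / 2) hi (by omega) (by omega) (by omega) hfm hnf
      · rw [if_neg hfm]
        refine ih lo ((lo + hi + 1) / 2 - 1) (by omega) h0 (by omega) hf ?_
        rw [show (lo + hi + 1) / 2 - 1 + 1 = (lo + hi + 1) / 2 by ring]
        exact Bool.eq_false_iff.2 hfm
    · rw [dif_neg hlt]
      have heq : lo = hi := by omega
      exact ⟨h0, hf, by rw [heq]; exact hnf⟩

theorem pvFeasible_iff (K : Int) (emp : List Int) (m : Int) (hm : 0 ≤ m) :
    pvFeasible K emp m = true ↔ feas K emp m := by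
  unfold pvFeasible feas
  rw [filter_min_sum_eq emp m hm]
  simp

-- ===== VERDICT (by name: the statement is the Claim_ definition above) =====
theorem calculate_max_projects_spec : Claim_equal_calculate_max_projects := by
  intro N K emp _ hpre
  obtain ⟨hK, hpre2⟩ := hpre
  unfold Spec_calculate_max_projects calculate_max_projects calculate_max_projects_alt
  by_cases hKN : K > N
  · rw [if_pos hKN, if_pos hKN]
  · rw [if_neg hKN, if_neg hKN]
    show pvLoopA K _ (PySem.List.sorted emp (fun c => c) true) = _
    set L := PySem.List.sorted emp (fun c => c) true with hL
    have hperm : L.Perm emp := PySem.List.sorted_perm emp (fun c => c) true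
    have hs : L.Pairwise (fun a b => b ≤ a) := PySem.List.sorted_pairwise_rev emp (fun c => c)
    have hOK : K.toNat ≤ L.length ∨ ∃ c ∈ L, c ≤ 0 := by
      rcases hpre2 with h | h | h
      · omega
      · left
        rw [hperm.length_eq]
        omega
      · right
        rw [List.all_eq_true] at h
        push_neg at h
        obtain ⟨c, hc, hc0⟩ := h
        exact ⟨c, hperm.mem_iff.2 hc, by simpa using hc0⟩
    have hfuel : sumpos L < (((L.map (fun c => max c 0)).sum.toNat + 1 : Nat) : Int) := by
      have h1 : sumpos L = (L.map (fun c => max c 0)).sum := rfl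
      have h2 := sumpos_nonneg L
      push_cast
      omega
    obtain ⟨hA0, hAf, hAnf⟩ := loopA_spec K hK _ L hs hOK hfuel
    set rA := pvLoopA K ((L.map (fun c => max c 0)).sum.toNat + 1) L with hrA
    have hfeqA : ∀ x, feas K L x ↔ feas K emp x := fun x => by
      unfold feas
      rw [gsum_perm L emp hperm]
    have hAf' : feas K emp rA := (hfeqA _).1 hAf
    have hAnf' : ¬ feas K emp (rA + 1) := fun hcon => hAnf ((hfeqA _).2 hcon)
    -- B side
    have htot : pvBTotal emp = sumpos emp := filter_sum_eq_sumpos emp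
    have hsp : 0 ≤ sumpos emp := sumpos_nonneg emp
    have hhi : PySem.Int.floordiv (pvBTotal emp) K = sumpos emp / K := by
      rw [htot]
      exact PySem.Int.floordiv_eq_ediv_of_pos (by omega)
    rw [hhi]
    set hi := sumpos emp / K with hhi2
    have hhi0 : 0 ≤ hi := Int.ediv_nonneg hsp (by omega)
    have hf0 : pvFeasible K emp 0 = true := by
      rw [pvFeasible_iff K emp 0 le_rfl]
      unfold feas
      rw [gsum_zero]
      simp
    have hfhi : pvFeasible K emp (hi + 1) = false := by
      rw [Bool.eq_false_iff]
      intro hcon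
      rw [pvFeasible_iff K emp _ (by omega)] at hcon
      unfold feas at hcon
      have h1 : gsum emp (hi + 1) ≤ sumpos emp := gsum_le_sumpos emp _ (by omega)
      have h2 : K * (sumpos emp / K) + sumpos emp % K = sumpos emp :=
        by rw [mul_comm]; exact Int.ediv_add_emod' (sumpos emp) K
      have h3 : 0 ≤ sumpos emp % K := Int.emod_nonneg _ (by omega)
      have h4 : sumpos emp % K < K := Int.emod_lt_of_pos _ (by omega)
      have h5 : K * (hi + 1) = K * (sumpos emp / K) + K := by rw [hhi2]; ring
      omega
    obtain ⟨hB0, hBf, hBnf⟩ :=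
      bsearch_spec K emp hK (hi - 0).toNat 0 hi le_rfl le_rfl hhi0 hf0 hfhi
    set rB := pvBSearch K emp 0 hi with hrB
    have hBf' : feas K emp rB := (pvFeasible_iff K emp rB hB0).1 hBf
    have hBnf' : ¬ feas K emp (rB + 1) := by
      intro hcon
      rw [← pvFeasible_iff K emp _ (by omega)] at hcon
      rw [hBnf] at hcon
      exact Bool.false_ne_true hcon
    by_contra hne
    rcases lt_or_gt_of_ne hne with hlt | hgt
    · exact hAnf' (feas_mono K emp rB (rA + 1) (by omega) (by omega) hBf')
    · exact hBnf' (feas_mono K emp rA (rB + 1) (by omega) (by omega) hAf')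

@[simp] theorem calculate_max_projects_raises : Claim_raises_calculate_max_projects := by
  unfold Claim_raises_calculate_max_projects
  constructor
  · intro N K employees _ hr hp
    unfold Raises_calculate_max_projects at hr
    unfold Pre_calculate_max_projects at hp
    rcases hp with ⟨-, h | h | h⟩ <;> [omega; omega; exact h hr.2.2.2]
  · refine ⟨by decide, by decide, ?_⟩
    show calculate_max_projects_alt 1 1 [] = 0
    have h0 : PySem.Int.floordiv (pvBTotal []) 1 = 0 := by decide
    rw [calculate_max_projects_alt, if_neg (by decide), h0, pvBSearch]
    simp
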